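-- pv_equiv track=rewrite | github.com/nohsion/Algorithm | exercise/pocketmon.py | solution
-- ===== SOURCE A (Python) =====
-- def solution(nums):
--     answer = 0
--
--     n = len(nums)
--     m = int(len(nums)/2)
--
--     picked = []
--
--     for i in range(n):
--         if nums[i] not in picked:
--             picked.append(nums[i])
--         if len(picked) == m:
--             answer = m
--             return answer
--
--     answer = len(picked)
--
--     return answer
-- ===== SOURCE B (Python) =====
-- def solution(nums):
--     s = sorted(nums)
--     m = len(nums) // 2
--     count = 0
--     prev = object()  # sentinel: first element always counts
--     for x in s:
--         if x != prev:
--             count += 1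
--             prev = x
--             if count == m:
--                 return m
--     return count
-- ===== Notes on version B (the rewrite author's own statement) =====
-- stated objective: faster
-- what changed: Replaces the O(n^2) linear membership scan over a growing 'picked' list with sort-then-adjacent-compare: sort once, then a single pass counting value changes, with the same early return once the count reaches len(nums)//2.
import Mathlib
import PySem

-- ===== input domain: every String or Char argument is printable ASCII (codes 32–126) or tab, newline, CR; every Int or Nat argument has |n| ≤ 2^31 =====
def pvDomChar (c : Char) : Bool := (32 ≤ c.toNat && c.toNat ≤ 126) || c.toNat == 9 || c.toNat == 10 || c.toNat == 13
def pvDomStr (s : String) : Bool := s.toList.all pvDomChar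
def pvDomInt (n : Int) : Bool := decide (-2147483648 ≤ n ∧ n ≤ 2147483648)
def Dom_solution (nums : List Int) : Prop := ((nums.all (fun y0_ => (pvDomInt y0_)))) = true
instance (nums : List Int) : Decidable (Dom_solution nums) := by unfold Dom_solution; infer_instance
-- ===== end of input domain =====

-- B replaces A's quadratic membership scan over a growing `picked` list with
-- sort-then-adjacent-compare (one pass over the sorted list), keeping the same
-- early return once the distinct count reaches len(nums)//2.

-- ===== PORT A =====
-- for i in range(n): if nums[i] not in picked: picked.append(nums[i]); if len(picked)==m: return m
def solLoopA (m : Int) : List Int → List Int → Int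
  | [], picked => (picked.length : Int)
  | x :: rest, picked =>
    let picked' := if x ∈ picked then picked else picked ++ [x]
    if (picked'.length : Int) = m then m else solLoopA m rest picked'

def solution (nums : List Int) : Int :=
  solLoopA ((nums.length / 2 : Nat) : Int) nums []

-- ===== PORT B =====
-- for x in sorted(nums): if x != prev: count += 1; prev = x; if count == m: return m
-- prev starts as a fresh sentinel `object()`: modelled as `none : Option Int`.
def solLoopB (m : Int) : List Int → Option Int → Int → Int
  | [], _, count => count
  | x :: rest, prev, count =>
    if some x ≠ prev then
      if count + 1 = m then m
      else solLoopB m rest (some x) (count + 1)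
    else solLoopB m rest prev count

def solution_alt (nums : List Int) : Int :=
  solLoopB ((nums.length / 2 : Nat) : Int)
    (PySem.List.sorted nums (fun x => x) false) none 0

-- ===== PRECONDITION & SPEC =====
def Spec_solution (nums : List Int) (out : Int) : Prop := out = solution_alt nums
instance (nums : List Int) (out : Int) : Decidable (Spec_solution nums out) := by unfold Spec_solution; infer_instance

-- ===== CLAIM (what is proved, stated in full; the proofs are below) =====
def Claim_equal_solution : Prop := ∀ (nums : List Int), Dom_solution nums → Spec_solution nums (solution nums)

-- ===== LEMMAS AND PROOFS =====

theorem solLoopA_spec (m : Nat) (rest picked : List Int)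
    (hnd : picked.Nodup) (hm : m = 0 ∨ picked.length < m) :
    solLoopA (m : Int) rest picked =
      if picked.length < m ∧ m ≤ (picked.toFinset ∪ rest.toFinset).card then (m : Int)
      else (((picked.toFinset ∪ rest.toFinset).card : Nat) : Int) := by
  induction rest generalizing picked with
  | nil =>
    have hcard : picked.toFinset.card = picked.length := List.toFinset_card_of_nodup hnd
    simp only [solLoopA, List.toFinset_nil, Finset.union_empty, hcard]
    rw [if_neg (by omega)]
  | cons x rest ih =>
    by_cases hx : x ∈ picked
    · have hset : picked.toFinset ∪ (x :: rest).toFinset = picked.toFinset ∪ rest.toFinset := by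
        ext y; simp; intro hy; subst hy; tauto
      have hlen : ¬ ((picked.length : Int) = (m : Int)) := by
        intro h
        have hh : picked.length = m := by exact_mod_cast h
        rcases hm with h0 | hlt
        · have : picked = [] := List.length_eq_zero_iff.mp (by omega)
          simp [this] at hx
        · omega
      simp only [solLoopA, if_pos hx, if_neg hlen]
      rw [ih picked hnd hm, hset]
    · have hnd' : (picked ++ [x]).Nodup := by
        simp [List.nodup_append, hnd]
        intro a ha h
        exact hx (h ▸ ha)
      have hset : (picked ++ [x]).toFinset ∪ rest.toFinset
          = picked.toFinset ∪ (x :: rest).toFinset := by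
        ext y; simp
      have hcard' : (picked ++ [x]).toFinset.card = picked.length + 1 := by
        simp only [List.toFinset_append, List.toFinset_cons, List.toFinset_nil,
          insert_empty_eq, Finset.union_singleton]
        rw [Finset.card_insert_of_notMem (by simp [hx]), List.toFinset_card_of_nodup hnd]
      by_cases heq : ((picked.length : Int) + 1 = (m : Int))
      · have hm' : picked.length + 1 = m := by exact_mod_cast heq
        have hsub : (picked ++ [x]).toFinset ⊆ picked.toFinset ∪ (x :: rest).toFinset := by
          rw [← hset]; exact Finset.subset_union_left
        have hle : m ≤ (picked.toFinset ∪ (x :: rest).toFinset).card := by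
          calc m = (picked ++ [x]).toFinset.card := by rw [hcard']; omega
            _ ≤ _ := Finset.card_le_card hsub
        simp only [solLoopA, if_neg hx]
        rw [if_pos (by
          simp only [List.length_append, List.length_cons, List.length_nil]
          push_cast; omega), if_pos ⟨by omega, hle⟩]
      · have hne : picked.length + 1 ≠ m := fun h => heq (by exact_mod_cast h)
        have hm'' : m = 0 ∨ (picked ++ [x]).length < m := by
          simp only [List.length_append, List.length_cons, List.length_nil]
          rcases hm with h0 | hlt
          · exact Or.inl h0
          · right; omega
        simp only [solLoopA, if_neg hx]
        rw [if_neg (by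
          simp only [List.length_append, List.length_cons, List.length_nil]
          push_cast; omega)]
        rw [ih (picked ++ [x]) hnd' hm'', hset]
        rcases hm with h0 | hlt
        · have hc1 : ¬ ((picked ++ [x]).length < m) := by omega
          have hc2 : ¬ (picked.length < m) := by omega
          rw [if_neg (fun h => hc1 h.1), if_neg (fun h => hc2 h.1)]
        · have h2 : (picked ++ [x]).length < m := by
            simp only [List.length_append, List.length_cons, List.length_nil]; omega
          have hiff : ((picked ++ [x]).length < m ∧
              m ≤ (picked.toFinset ∪ (x :: rest).toFinset).card) ↔
              (picked.length < m ∧ m ≤ (picked.toFinset ∪ (x :: rest).toFinset).card) :=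
            ⟨fun h => ⟨hlt, h.2⟩, fun h => ⟨h2, h.2⟩⟩
          rw [if_congr hiff rfl rfl]

-- the value prev can "block": empty for the sentinel, {p} for some p
def prevSet : Option Int → Finset Int
  | none => ∅
  | some p => {p}

theorem solLoopB_spec (m : Nat) (rest : List Int) (prev : Option Int) (count : Nat)
    (hsorted : rest.Pairwise (· ≤ ·))
    (hbound : ∀ p, prev = some p → ∀ y ∈ rest, p ≤ y)
    (hm : m = 0 ∨ count < m) :
    solLoopB (m : Int) rest prev (count : Int) =
      if count < m ∧ m ≤ count + (rest.toFinset \ prevSet prev).card then (m : Int)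
      else ((count + (rest.toFinset \ prevSet prev).card : Nat) : Int) := by
  induction rest generalizing prev count with
  | nil =>
    simp only [solLoopB, List.toFinset_nil, Finset.empty_sdiff, Finset.card_empty,
      Nat.add_zero]
    rw [if_neg (by omega)]
  | cons x rest ih =>
    have hsorted' : rest.Pairwise (· ≤ ·) := hsorted.tail
    have hxle : ∀ y ∈ rest, x ≤ y := fun y hy => List.rel_of_pairwise_cons hsorted hy
    by_cases hp : some x = prev
    · -- x equals the previous value: skipped, set difference unchanged
      have hset : ((x :: rest).toFinset \ prevSet prev) = (rest.toFinset \ prevSet prev) := by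
        subst hp
        ext y; simp [prevSet]; tauto
      have hbound' : ∀ p, prev = some p → ∀ y ∈ rest, p ≤ y := by
        intro p hpp y hy
        rw [← hp] at hpp
        cases hpp
        exact hxle y hy
      simp only [solLoopB]
      rw [if_neg (not_not_intro hp), ih prev count hsorted' hbound' hm, hset]
    · -- x is a new value
      have hxnot : x ∉ prevSet prev := by
        cases prev with
        | none => simp [prevSet]
        | some p =>
          simp only [prevSet, Finset.mem_singleton]
          intro h; exact hp (by rw [h])
      have hsplit : ((x :: rest).toFinset \ prevSet prev)
          = insert x (rest.toFinset \ {x}) := by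
        ext y
        simp only [List.toFinset_cons, Finset.mem_sdiff, Finset.mem_insert,
          Finset.mem_singleton]
        constructor
        · rintro ⟨hy | hy, hny⟩
          · exact Or.inl hy
          · by_cases hyx : y = x
            · exact Or.inl hyx
            · exact Or.inr ⟨hy, hyx⟩
        · rintro (hy | ⟨hy, hyx⟩)
          · subst hy; exact ⟨Or.inl rfl, hxnot⟩
          · refine ⟨Or.inr hy, ?_⟩
            cases prev with
            | none => simp [prevSet]
            | some p =>
              simp only [prevSet, Finset.mem_singleton]
              intro hyp
              subst hyp
              have h1 : y ≤ x := hbound y rfl x List.mem_cons_self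
              have h2 : x ≤ y := hxle y (List.mem_toFinset.mp hy)
              exact hp (congrArg some (le_antisymm h2 h1))
      have hcardsplit : ((x :: rest).toFinset \ prevSet prev).card
          = (rest.toFinset \ {x}).card + 1 := by
        rw [hsplit, Finset.card_insert_of_notMem (by simp)]
      have hbound' : ∀ p, some x = some p → ∀ y ∈ rest, p ≤ y := by
        intro p hpp y hy; cases hpp; exact hxle y hy
      have hps : prevSet (some x) = ({x} : Finset Int) := rfl
      by_cases heq : ((count : Int) + 1 = (m : Int))
      · have hm' : count + 1 = m := by exact_mod_cast heq
        simp only [solLoopB, if_pos hp, if_pos heq]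
        rw [if_pos ⟨by omega, by omega⟩]
      · have hne : count + 1 ≠ m := fun h => heq (by exact_mod_cast h)
        have hm'' : m = 0 ∨ count + 1 < m := by omega
        simp only [solLoopB, if_pos hp, if_neg heq]
        have hcast : (count : Int) + 1 = ((count + 1 : Nat) : Int) := by push_cast; ring
        rw [hcast, ih (some x) (count + 1) hsorted' hbound' hm'']
        have harith : count + 1 + (rest.toFinset \ prevSet (some x)).card
            = count + ((x :: rest).toFinset \ prevSet prev).card := by
          rw [hps, hcardsplit]; ring
        rcases hm with h0 | hlt
        · have hc1 : ¬ (count + 1 < m) := by omega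
          have hc2 : ¬ (count < m) := by omega
          rw [if_neg (fun h => hc1 h.1), if_neg (fun h => hc2 h.1), harith]
        · have h2 : count + 1 < m := by omega
          rw [harith]
          have hiff : (count + 1 < m ∧
              m ≤ count + ((x :: rest).toFinset \ prevSet prev).card) ↔
              (count < m ∧ m ≤ count + ((x :: rest).toFinset \ prevSet prev).card) :=
            ⟨fun h => ⟨hlt, h.2⟩, fun h => ⟨h2, h.2⟩⟩
          rw [if_congr hiff rfl rfl]

-- ===== VERDICT (by name: the statement is the Claim_ definition above) =====
theorem solution_spec : Claim_equal_solution := by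
  intro nums _
  unfold Spec_solution solution solution_alt
  have hA := solLoopA_spec (nums.length / 2) nums [] (by simp)
    (by simp only [List.length_nil]; omega)
  have hperm := PySem.List.sorted_perm nums (fun x : Int => x) false
  have hB := solLoopB_spec (nums.length / 2)
      (PySem.List.sorted nums (fun x : Int => x) false) none 0
      (PySem.List.sorted_pairwise nums (fun x : Int => x))
      (by intro p h; cases h) (by omega)
  have hsetB : (PySem.List.sorted nums (fun x : Int => x) false).toFinset = nums.toFinset :=
    List.toFinset_eq_of_perm _ _ hperm
  have hpn : prevSet none = (∅ : Finset Int) := rfl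
  have h0 : ((0 : Nat) : Int) = (0 : Int) := rfl
  rw [h0] at hB
  rw [hA, hB, hpn, hsetB]
  simp only [Finset.sdiff_empty, List.toFinset_nil, Finset.empty_union,
    List.length_nil, Nat.zero_add]
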